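-- pv_equiv track=rewrite | github.com/jack-x/HackerEarthCode | E_Comrades.py | getHandShakes
-- ===== SOURCE A (Python) =====
-- def getHandShakes(hierarchy,soldier,superiors):
-- 	handshakes=0
-- 	if (soldier in hierarchy):
-- 		for s in hierarchy[soldier]:
-- 			handshakes+=getHandShakes(hierarchy,s,superiors+1)
-- 	else:
-- 		return superiors
--
-- 	return superiors+handshakes
-- ===== SOURCE B (Python) =====
-- def getHandShakes(hierarchy, soldier, superiors):
--     total = 0
--     stack = [(soldier, superiors)]
--     while stack:
--         node, sup = stack.pop()
--         total += sup
--         if node in hierarchy: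
--             for c in hierarchy[node]:
--                 stack.append((c, sup + 1))
--     return total
-- ===== Notes on version B (the rewrite author's own statement) =====
-- stated objective: alternative
-- what changed: B replaces A's recursion by an iterative explicit-stack worklist that pops (node, sup) pairs and accumulates the depths into a running total, pushing children with sup+1 instead of making recursive calls.
import Mathlib
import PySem

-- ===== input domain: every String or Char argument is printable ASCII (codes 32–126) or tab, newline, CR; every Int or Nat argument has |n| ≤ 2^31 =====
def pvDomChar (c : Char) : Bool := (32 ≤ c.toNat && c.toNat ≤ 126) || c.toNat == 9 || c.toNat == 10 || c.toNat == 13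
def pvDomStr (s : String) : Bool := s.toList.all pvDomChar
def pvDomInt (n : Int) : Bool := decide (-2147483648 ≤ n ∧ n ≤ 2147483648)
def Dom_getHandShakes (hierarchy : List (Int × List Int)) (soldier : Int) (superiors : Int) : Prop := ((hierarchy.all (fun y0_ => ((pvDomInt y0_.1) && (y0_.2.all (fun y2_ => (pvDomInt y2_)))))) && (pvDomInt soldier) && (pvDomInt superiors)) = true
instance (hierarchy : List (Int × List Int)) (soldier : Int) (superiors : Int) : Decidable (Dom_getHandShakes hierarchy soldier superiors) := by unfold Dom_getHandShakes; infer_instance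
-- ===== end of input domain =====

-- B replaces A's recursion by an iterative explicit-stack worklist ("alternative", same cost).

-- shared dict primitives on the association list: lookup with Python-dict overwrite semantics
-- (last value for a key wins) and erasure of a key
def pvLookup : List (Int × List Int) → Int → Option (List Int)
  | [], _ => none
  | (k, v) :: t, x =>
    match pvLookup t x with
    | some r => some r
    | none => if k = x then some v else none

def pvEraseK (l : List (Int × List Int)) (x : Int) : List (Int × List Int) :=
  l.filter (fun kv => !(kv.1 == x))

theorem pvEraseK_length_lt {h : List (Int × List Int)} {x : Int}
    (hl : (pvLookup h x).isSome = true) : (pvEraseK h x).length < h.length := by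
  induction h with
  | nil => simp [pvLookup] at hl
  | cons p t ih =>
    obtain ⟨k, w⟩ := p
    by_cases hk : k = x
    · have hle : (pvEraseK t x).length ≤ t.length := List.length_filter_le _ _
      simp only [pvEraseK, List.filter, hk, beq_self_eq_true, Bool.not_true]
      exact Nat.lt_succ_of_le hle
    · simp only [pvLookup] at hl
      have hsome : (pvLookup t x).isSome = true := by
        cases hlt : pvLookup t x with
        | some r => rfl
        | none => rw [hlt, if_neg hk] at hl; simp at hl
      have := ih hsome
      simp only [pvEraseK, List.filter] at this ⊢
      have hne : ((k, w).1 == x) = false := by simpa using hk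
      simp only [hne, Bool.not_false, List.length_cons]
      omega

-- ===== PORT A =====
-- Lean needs a termination measure for A's tree recursion, so each recursive call carries the
-- hierarchy with the current key erased; on hierarchies where Python A returns (no cycle below
-- the start node, so no RecursionError) a key is never looked up again below itself and the
-- erasure is invisible: the port computes exactly Python A's value there.
mutual
def getHandShakesGo (h : List (Int × List Int)) (soldier : Int) (superiors : Int) : Int :=
  match hl : pvLookup h soldier with
  | some cs => superiors + getHandShakesFold (pvEraseK h soldier) cs (superiors + 1) 0
  | none => superiors
termination_by (h.length, 0)
decreasing_by exact Prod.Lex.left _ _ (pvEraseK_length_lt (by simp [hl]))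

def getHandShakesFold (h : List (Int × List Int)) (cs : List Int) (superiors : Int) (acc : Int) : Int :=
  match cs with
  | [] => acc
  | c :: t => getHandShakesFold h t superiors (acc + getHandShakesGo h c superiors)
termination_by (h.length, cs.length + 1)
decreasing_by
  all_goals exact Prod.Lex.right _ (by simp [List.length_cons])
end

def getHandShakes (hierarchy : List (Int × List Int)) (soldier : Int) (superiors : Int) : Int :=
  getHandShakesGo hierarchy soldier superiors

-- ===== PORT B =====
-- transliteration of Source B's explicit-stack loop (head of the list = top of the stack; Python's
-- pop-from-end / append-in-order makes children come off the stack in reverse order, hence the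
-- `.reverse` on push).  For the same termination reason as in port A, each pushed frame carries
-- the hierarchy with its parent's key erased — invisible wherever Python B terminates.
def pvWeight (h : List (Int × List Int)) : Nat :=
  (h.map (fun kv => kv.2.length + 2)).prod

theorem pvWeight_pos (h : List (Int × List Int)) : 0 < pvWeight h := by
  induction h with
  | nil => simp [pvWeight]
  | cons p t ih => simp only [pvWeight, List.map_cons, List.prod_cons] at *; positivity

theorem pvWeight_erase_le (h : List (Int × List Int)) (x : Int) :
    pvWeight (pvEraseK h x) ≤ pvWeight h := by
  induction h with
  | nil => simp [pvEraseK]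
  | cons p t ih =>
    by_cases hk : p.1 = x
    · simp only [pvEraseK, List.filter_cons, hk, beq_self_eq_true, Bool.not_true] at *
      calc pvWeight (List.filter (fun kv => !(kv.1 == x)) t) ≤ pvWeight t := ih
        _ ≤ pvWeight (p :: t) := by
            simp only [pvWeight, List.map_cons, List.prod_cons]
            exact Nat.le_mul_of_pos_left _ (by omega)
    · have hne : (p.1 == x) = false := by simpa using hk
      simp only [pvEraseK, List.filter_cons, hne, Bool.not_false, pvWeight,
        List.map_cons, List.prod_cons] at *
      exact Nat.mul_le_mul_left _ ih

theorem pvWeight_cons_le (p : Int × List Int) (t : List (Int × List Int)) :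
    pvWeight t ≤ pvWeight (p :: t) := by
  simp only [pvWeight, List.map_cons, List.prod_cons]
  exact Nat.le_mul_of_pos_left _ (by omega)

theorem pvWeight_lookup {h : List (Int × List Int)} {x : Int} {cs : List Int}
    (hl : pvLookup h x = some cs) :
    pvWeight (pvEraseK h x) * (cs.length + 2) ≤ pvWeight h := by
  induction h with
  | nil => simp [pvLookup] at hl
  | cons p t ih =>
    obtain ⟨k, v⟩ := p
    simp only [pvLookup] at hl
    by_cases hk : k = x
    · have herase : pvEraseK ((k, v) :: t) x = pvEraseK t x := by
        simp [pvEraseK, List.filter_cons, hk]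
      rw [herase]
      cases hlt : pvLookup t x with
      | some r =>
        rw [hlt] at hl
        have hrc : r = cs := by injection hl
        rw [hrc] at hlt
        exact le_trans (ih hlt) (pvWeight_cons_le _ _)
      | none =>
        rw [hlt, if_pos hk] at hl
        have hvc : v = cs := by injection hl
        calc pvWeight (pvEraseK t x) * (cs.length + 2)
            = (cs.length + 2) * pvWeight (pvEraseK t x) := Nat.mul_comm _ _
          _ ≤ (cs.length + 2) * pvWeight t := Nat.mul_le_mul_left _ (pvWeight_erase_le t x)
          _ = pvWeight ((k, v) :: t) := by rw [← hvc]; simp [pvWeight]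
    · have herase : pvEraseK ((k, v) :: t) x = (k, v) :: pvEraseK t x := by
        simp [pvEraseK, List.filter_cons, hk]
      rw [herase]
      cases hlt : pvLookup t x with
      | some r =>
        rw [hlt] at hl
        have hrc : r = cs := by injection hl
        rw [hrc] at hlt
        have ih' := ih hlt
        have h1 : pvWeight ((k, v) :: pvEraseK t x) = (v.length + 2) * pvWeight (pvEraseK t x) := by
          simp [pvWeight]
        have h2 : pvWeight ((k, v) :: t) = (v.length + 2) * pvWeight t := by simp [pvWeight]
        rw [h1, h2, Nat.mul_assoc]
        exact Nat.mul_le_mul_left _ ih'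
      | none => rw [hlt, if_neg hk] at hl; exact absurd hl (by simp)

def pvStackMeasure (stack : List (Int × List (Int × List Int) × Int)) : Nat :=
  (stack.map (fun it => pvWeight it.2.1)).sum

theorem pvStackMeasure_pop {n : Int} {h : List (Int × List Int)} {d : Int}
    (rest : List (Int × List (Int × List Int) × Int)) :
    pvStackMeasure rest < pvStackMeasure ((n, h, d) :: rest) := by
  have := pvWeight_pos h
  simp only [pvStackMeasure, List.map_cons, List.sum_cons]
  omega

theorem pvStackMeasure_push {n : Int} {h : List (Int × List Int)} {d : Int} {cs : List Int}
    (hl : pvLookup h n = some cs)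
    (rest : List (Int × List (Int × List Int) × Int)) :
    pvStackMeasure ((cs.reverse.map (fun c => (c, pvEraseK h n, d + 1))) ++ rest)
      < pvStackMeasure ((n, h, d) :: rest) := by
  have hw := pvWeight_lookup hl
  have hp := pvWeight_pos (pvEraseK h n)
  have hsum : ∀ (l : List Int), ((l.map (fun c => (c, pvEraseK h n, d + 1))).map
      (fun it => pvWeight it.2.1)).sum = l.length * pvWeight (pvEraseK h n) := by
    intro l
    induction l with
    | nil => simp
    | cons a t iht => simp only [List.map_cons, List.sum_cons, List.length_cons, iht]; ring
  simp only [pvStackMeasure, List.map_append, List.sum_append, List.map_cons, List.sum_cons]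
  rw [hsum cs.reverse, List.length_reverse]
  nlinarith

def pvStackRun (stack : List (Int × List (Int × List Int) × Int)) (total : Int) : Int :=
  match stack with
  | [] => total
  | (node, h, sup) :: rest =>
    match hl : pvLookup h node with
    | some cs =>
      pvStackRun ((cs.reverse.map (fun c => (c, pvEraseK h node, sup + 1))) ++ rest) (total + sup)
    | none => pvStackRun rest (total + sup)
termination_by pvStackMeasure stack
decreasing_by
  · exact pvStackMeasure_push hl rest
  · exact pvStackMeasure_pop rest

def getHandShakes_alt (hierarchy : List (Int × List Int)) (soldier : Int) (superiors : Int) : Int :=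
  pvStackRun [(soldier, hierarchy, superiors)] 0

-- ===== PRECONDITION & SPEC =====
-- last-wins successor lists (Python-dict overwrite) and bounded-step reachability, library calls only
def pvSuccs (h : List (Int × List Int)) (n : Int) : List Int :=
  ((((h.filter (fun kv => kv.1 == n)).getLast?).map Prod.snd).getD [])

def pvReach (h : List (Int × List Int)) : Nat → List Int → List Int
  | 0, f => f
  | k + 1, f => f ++ pvReach h k (f.flatMap (pvSuccs h))

-- Pre_ excludes exactly the inputs on which Python A raises (RecursionError): hierarchies with a
-- cycle reachable from `soldier`; Python B loops forever there.
def Pre_getHandShakes (hierarchy : List (Int × List Int)) (soldier : Int) (superiors : Int) : Prop :=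
  (pvReach hierarchy hierarchy.length [soldier]).all
    (fun k => !(pvReach hierarchy hierarchy.length (pvSuccs hierarchy k)).contains k) = true
instance (hierarchy : List (Int × List Int)) (soldier : Int) (superiors : Int) : Decidable (Pre_getHandShakes hierarchy soldier superiors) := by unfold Pre_getHandShakes; infer_instance

def pvWitness_getHandShakes : (List (Int × List Int)) × Int × Int := ([(1, [2, 3]), (2, [3])], 1, 0)

def Spec_getHandShakes (hierarchy : List (Int × List Int)) (soldier : Int) (superiors : Int) (out : Int) : Prop := out = getHandShakes_alt hierarchy soldier superiors
instance (hierarchy : List (Int × List Int)) (soldier : Int) (superiors : Int) (out : Int) : Decidable (Spec_getHandShakes hierarchy soldier superiors out) := by unfold Spec_getHandShakes; infer_instance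

-- ===== CLAIM (what is proved, stated in full; the proofs are below) =====
def Claim_equal_getHandShakes : Prop := ∀ (hierarchy : List (Int × List Int)) (soldier : Int) (superiors : Int), Dom_getHandShakes hierarchy soldier superiors → Pre_getHandShakes hierarchy soldier superiors → Spec_getHandShakes hierarchy soldier superiors (getHandShakes hierarchy soldier superiors)

-- ===== LEMMAS AND PROOFS =====

theorem getHandShakesFold_eq_sum (h : List (Int × List Int)) (cs : List Int) (s acc : Int) :
    getHandShakesFold h cs s acc = acc + (cs.map (fun c => getHandShakesGo h c s)).sum := by
  induction cs generalizing acc with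
  | nil => simp [getHandShakesFold]
  | cons c t ih => rw [getHandShakesFold, ih]; simp; ring

-- stack invariant: running the worklist adds Σ getHandShakesGo over the frames to the total
theorem pvStackRun_eq_sum :
    ∀ N (stack : List (Int × List (Int × List Int) × Int)), pvStackMeasure stack ≤ N →
      ∀ total, pvStackRun stack total
        = total + (stack.map (fun it => getHandShakesGo it.2.1 it.1 it.2.2)).sum := by
  intro N
  induction N with
  | zero =>
    intro stack hm total
    cases stack with
    | nil => simp [pvStackRun]
    | cons it rest =>
      exfalso
      have hp := pvWeight_pos it.2.1
      simp only [pvStackMeasure, List.map_cons, List.sum_cons] at hm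
      omega
  | succ N ih =>
    intro stack hm total
    cases stack with
    | nil => simp [pvStackRun]
    | cons it rest =>
      obtain ⟨node, h, sup⟩ := it
      rw [pvStackRun]
      simp only [List.map_cons, List.sum_cons]
      rw [getHandShakesGo]
      cases hl : pvLookup h node with
      | some cs =>
        simp only []
        have hlt : pvStackMeasure ((cs.reverse.map (fun c => (c, pvEraseK h node, sup + 1))) ++ rest) ≤ N := by
          have := pvStackMeasure_push (d := sup) hl rest
          omega
        rw [ih _ hlt]
        rw [getHandShakesFold_eq_sum]
        simp only [List.map_append, List.sum_append, List.map_map]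
        have hrev : (cs.reverse.map ((fun it => getHandShakesGo it.2.1 it.1 it.2.2) ∘
            (fun c => (c, pvEraseK h node, sup + 1))))
            = (cs.map (fun c => getHandShakesGo (pvEraseK h node) c (sup + 1))).reverse := by
          rw [← List.map_reverse]
          rfl
        rw [hrev, List.sum_reverse]
        ring
      | none =>
        simp only []
        have hlt : pvStackMeasure rest ≤ N := by
          have := pvStackMeasure_pop (n := node) (h := h) (d := sup) rest
          omega
        rw [ih _ hlt]
        ring

-- ===== VERDICT (by name: the statement is the Claim_ definition above) =====
theorem getHandShakes_spec : Claim_equal_getHandShakes := by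
  intro h s sup _ _
  unfold Spec_getHandShakes getHandShakes getHandShakes_alt
  rw [pvStackRun_eq_sum (pvStackMeasure [(s, h, sup)]) _ (le_refl _)]
  simp
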